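-- pv_equiv track=rewrite | github.com/pymc-devs/pymc | pymc3/stats.py | make_indices
-- ===== SOURCE A (Python) =====
-- def make_indices(dimensions):
--     # Generates complete set of indices for given dimensions
--     level = len(dimensions)
--     if level == 1:
--         return list(range(dimensions[0]))
--     indices = [[]]
--     while level:
--         _indices = []
--         for j in range(dimensions[level - 1]):
--             _indices += [[j] + i for i in indices]
--         indices = _indices
--         level -= 1
--     try:
--         return [tuple(i) for i in indices]
--     except TypeError:
--         return indices
-- ===== SOURCE B (Python) =====
-- def make_indices(dimensions):
--     # Same result as A: bare ints for a single dimension, tuples otherwise,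
--     # built by recursion on the dimension list instead of an iterative
--     # back-to-front prepend loop.
--     if len(dimensions) == 1:
--         return list(range(dimensions[0]))
--
--     def rec(dims):
--         if not dims:
--             return [()]
--         tail = rec(dims[1:])
--         return [(j,) + r for j in range(dims[0]) for r in tail]
--
--     return rec(dimensions)
-- ===== Notes on version B (the rewrite author's own statement) =====
-- stated objective: alternative
-- what changed: Replaces A's iterative while-loop that builds the index list back-to-front by repeated prepending with a structural recursion on the dimensions list (base case [()], cons case a product comprehension).
-- outside the precondition, e.g. on make_indices([2]): A returns [0, 1], B returns [0, 1]
import Mathlib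
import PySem

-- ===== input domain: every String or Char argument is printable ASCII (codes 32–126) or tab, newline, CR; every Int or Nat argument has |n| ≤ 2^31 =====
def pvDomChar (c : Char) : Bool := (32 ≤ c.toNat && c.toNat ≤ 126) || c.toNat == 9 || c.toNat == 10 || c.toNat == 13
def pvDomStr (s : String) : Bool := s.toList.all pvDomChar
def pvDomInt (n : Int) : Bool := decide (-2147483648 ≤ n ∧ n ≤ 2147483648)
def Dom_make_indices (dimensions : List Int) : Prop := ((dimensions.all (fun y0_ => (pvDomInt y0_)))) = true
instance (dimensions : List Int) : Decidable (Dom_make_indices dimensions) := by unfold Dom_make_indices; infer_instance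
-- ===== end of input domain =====

-- B rewrites A's iterative back-to-front prepend loop as a structural recursion on the
-- dimensions list; same return value everywhere (A is total).
-- Encoding note: Python's len==1 branch returns bare ints and the general branch returns
-- tuples; both are encoded as List Int rows ([i] for a bare int), tuple() is the identity.

-- ===== PORT A =====
-- while-loop of A: fuel = level; each iteration uses dimensions[level-1] and prepends j
def makeIndicesLoop (dims : List Int) : Nat → List (List Int) → List (List Int)
  | 0, indices => indices
  | Nat.succ k, indices =>
      -- _indices = []; for j in range(dimensions[level-1]): _indices += [[j] + i for i in indices]
      let d := PySem.List.pyGetD dims (Int.ofNat k) 0   -- dimensions[level-1]; always in range here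
      makeIndicesLoop dims k
        ((PySem.List.pyRange 0 d 1).foldl (fun acc j => acc ++ indices.map (fun i => j :: i)) [])

def make_indices (dimensions : List Int) : List (List Int) :=
  let level := dimensions.length
  if level == 1 then
    (PySem.List.pyRange 0 (PySem.List.pyGetD dimensions 0 0) 1).map (fun i => [i])
  else
    (makeIndicesLoop dimensions level [[]]).map (fun i => i)   -- [tuple(i) for i in indices]

-- ===== PORT B =====
def makeIndicesRec : List Int → List (List Int)
  | [] => [[]]
  | d :: ds =>
      let tail := makeIndicesRec ds   -- tail = rec(dims[1:]), computed once
      (PySem.List.pyRange 0 d 1).flatMap (fun j => tail.map (fun r => j :: r))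

def make_indices_alt (dimensions : List Int) : List (List Int) :=
  if dimensions.length == 1 then
    (PySem.List.pyRange 0 (PySem.List.pyGetD dimensions 0 0) 1).map (fun i => [i])
  else
    makeIndicesRec dimensions

-- ===== PRECONDITION & SPEC =====
-- Pre_ excludes exactly the single-dimension inputs, on which Python A (and B) return a list of
-- bare ints rather than tuples — a value outside the declared return type list[tuple[int, ...]].
def Pre_make_indices (dimensions : List Int) : Prop := dimensions.length ≠ 1
instance (dimensions : List Int) : Decidable (Pre_make_indices dimensions) := by unfold Pre_make_indices; infer_instance
def pvWitness_make_indices : List Int := [2, 3]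

def Spec_make_indices (dimensions : List Int) (out : List (List Int)) : Prop := out = make_indices_alt dimensions
instance (dimensions : List Int) (out : List (List Int)) : Decidable (Spec_make_indices dimensions out) := by unfold Spec_make_indices; infer_instance

-- ===== CLAIM (what is proved, stated in full; the proofs are below) =====
def Claim_equal_make_indices : Prop := ∀ (dimensions : List Int), Dom_make_indices dimensions → Pre_make_indices dimensions → Spec_make_indices dimensions (make_indices dimensions)

-- ===== LEMMAS AND PROOFS =====

lemma foldl_append_map (R : List Int) (I : List (List Int)) :
    R.foldl (fun acc j => acc ++ I.map (fun i => j :: i)) [] =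
      R.flatMap (fun j => I.map (fun i => j :: i)) := by
  simpa using PySem.List.foldl_append_eq_flatMap (fun j => I.map (fun i => j :: i)) R []

lemma flatMap_singleton_map (r : List Int) :
    List.flatMap (fun j => [[j]]) r = List.map (fun j => [j]) r := by
  induction r with
  | nil => rfl
  | cons x xs ih => simp [List.flatMap_cons, ih]

lemma rec_snoc (xs : List Int) (d : Int) :
    makeIndicesRec (xs ++ [d]) =
      (makeIndicesRec xs).flatMap (fun p => (PySem.List.pyRange 0 d 1).map (fun j => p ++ [j])) := by
  induction xs with
  | nil => simp [makeIndicesRec, flatMap_singleton_map]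
  | cons x xs ih =>
      simp only [List.cons_append, makeIndicesRec, ih]
      simp [List.flatMap_assoc, List.map_flatMap, List.flatMap_map, List.map_map, Function.comp_def]

lemma loop_spec (dims : List Int) (k : Nat) (hk : k ≤ dims.length) (I : List (List Int)) :
    makeIndicesLoop dims k I =
      (makeIndicesRec (dims.take k)).flatMap (fun p => I.map (fun i => p ++ i)) := by
  induction k generalizing I with
  | zero => simp [makeIndicesLoop, makeIndicesRec]
  | succ k ih =>
      have hk' : k < dims.length := hk
      have hget : PySem.List.pyGetD dims (Int.ofNat k) 0 = dims[k] := by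
        rw [show Int.ofNat k = (k : Int) from rfl, PySem.List.pyGetD_natCast]
        exact List.getD_eq_getElem dims 0 hk'
      have htake : dims.take (k + 1) = dims.take k ++ [dims[k]] := by
        rw [List.take_add_one]
        simp [List.getElem?_eq_getElem hk']
      rw [makeIndicesLoop, foldl_append_map, ih (Nat.le_of_lt hk'), htake, rec_snoc, hget]
      simp [List.flatMap_assoc, List.map_flatMap, List.flatMap_map, List.map_map, Function.comp_def]

-- ===== VERDICT (by name: the statement is the Claim_ definition above) =====
theorem make_indices_spec : Claim_equal_make_indices := by
  intro dims _ hpre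
  unfold Spec_make_indices make_indices make_indices_alt
  have h : (dims.length == 1) = false := by simpa [Pre_make_indices] using hpre
  · simp only [h, Bool.false_eq_true]
    rw [loop_spec dims dims.length le_rfl [[]]]
    simp
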